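-- pv_equiv track=rewrite | github.com/rogue0137/practice | leetcode_python/hard/palindrome-pairs.py | all_valid_suffixes
-- ===== SOURCE A (Python) =====
-- def all_valid_suffixes(word):
--     valid_suffixes = []
--     for i in range(len(word)):
--         word_up_to_i_plus_one = word[:i+1]
--         reversed_word = word_up_to_i_plus_one[::-1]
--         if word_up_to_i_plus_one == reversed_word:
--             word_ending_at_i_plus_one = word[i + 1:]
--             valid_suffixes.append(word_ending_at_i_plus_one)
--     return valid_suffixes
-- ===== SOURCE B (Python) =====
-- def all_valid_suffixes(word):
--     # Single left-to-right scan carrying the prefix and its reverse incrementally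
--     # (no per-step slicing/reversal of word); emits the remaining tail whenever
--     # the prefix so far equals its reverse.
--     out = []
--     pref, rev = [], []
--     rest = list(word)
--     while rest:
--         c = rest[0]
--         rest = rest[1:]
--         pref = pref + [c]
--         rev = [c] + rev
--         if pref == rev:
--             out.append(''.join(rest))
--     return out
-- ===== Notes on version B (the rewrite author's own statement) =====
-- stated objective: alternative
-- what changed: Replaced the index loop that re-slices word[:i+1], reverses it and slices word[i+1:] at every step by a single scan over the character list that carries the growing prefix and its reverse as accumulators and emits the loop's remaining tail whenever they are equal.
import Mathlib
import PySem

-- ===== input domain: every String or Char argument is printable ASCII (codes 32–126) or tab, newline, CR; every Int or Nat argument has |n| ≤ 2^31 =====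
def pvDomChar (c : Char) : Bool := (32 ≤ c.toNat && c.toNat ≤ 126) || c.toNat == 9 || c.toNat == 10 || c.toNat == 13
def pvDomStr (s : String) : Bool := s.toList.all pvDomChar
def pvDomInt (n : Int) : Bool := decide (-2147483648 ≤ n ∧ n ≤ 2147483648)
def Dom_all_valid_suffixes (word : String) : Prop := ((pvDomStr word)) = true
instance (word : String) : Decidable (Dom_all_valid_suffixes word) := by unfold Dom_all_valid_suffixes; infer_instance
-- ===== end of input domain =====

-- B replaces A's index loop with per-step string slicing by one incremental scan carrying
-- the prefix and its reverse incrementally (alternative decomposition, same asymptotic cost).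


-- ===== PORT A =====
-- for i in range(len(word)): w1 = word[:i+1]; rev = w1[::-1]; if w1 == rev: append(word[i+1:])
def all_valid_suffixes (word : String) : List String :=
  (PySem.List.pyRange 0 (PySem.Str.len word) 1).foldl
    (fun acc i =>
      let w1 := PySem.Str.slice word none (some (i + 1))
      match PySem.Str.slice? w1 none none (-1) with   -- w1[::-1]; never none: step -1 ≠ 0
      | some rev =>
          if w1 = rev then acc ++ [PySem.Str.slice word (some (i + 1)) none] else acc
      | none => acc)
    []

-- ===== PORT B =====
-- Source B's while loop: pref = pref + [c]; rev = [c] + rev; rest = rest[1:];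
-- append ''.join(rest) to out when pref == rev.
def avsGo (pref rev rest : List Char) (out : List String) : List String :=
  match rest with
  | [] => out
  | c :: tail =>
      let pref2 := pref ++ [c]
      let rev2 := c :: rev
      avsGo pref2 rev2 tail (if pref2 = rev2 then out ++ [String.ofList tail] else out)

def all_valid_suffixes_alt (word : String) : List String :=
  avsGo [] [] word.toList []

-- ===== PRECONDITION & SPEC =====
def Spec_all_valid_suffixes (word : String) (out : List String) : Prop := out = all_valid_suffixes_alt word
instance (word : String) (out : List String) : Decidable (Spec_all_valid_suffixes word out) := by unfold Spec_all_valid_suffixes; infer_instance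

-- ===== CLAIM (what is proved, stated in full; the proofs are below) =====
def Claim_equal_all_valid_suffixes : Prop := ∀ (word : String), Dom_all_valid_suffixes word → Spec_all_valid_suffixes word (all_valid_suffixes word)

-- ===== LEMMAS AND PROOFS =====

-- Shifting a filtered map off List.range (n+1): peel index 0, re-index the rest by +1.
theorem filter_map_range_shift {α : Type} (p : Nat → Bool) (f : Nat → α) (n : Nat) :
    List.map f (List.filter p (List.range (n + 1))) =
      (if p 0 then [f 0] else []) ++
        List.map (fun k => f (k + 1)) (List.filter (fun k => p (k + 1)) (List.range n)) := by
  rw [List.range_succ_eq_map, List.filter_cons]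
  by_cases h : p 0 = true <;> simp [h, List.filter_map, Function.comp_def]

-- B's loop, with rev = pref.reverse, computes the positional filter-map form.
theorem avsGo_eq (rest : List Char) : ∀ (pref : List Char) (out : List String),
    avsGo pref pref.reverse rest out =
      out ++ ((List.range rest.length).filter
          (fun k => decide (pref ++ rest.take (k + 1) = (pref ++ rest.take (k + 1)).reverse))).map
        (fun k => String.ofList (rest.drop (k + 1))) := by
  induction rest with
  | nil => intro pref out; simp [avsGo]
  | cons c tail ih =>
    intro pref out
    have hrev : c :: pref.reverse = (pref ++ [c]).reverse := by simp
    simp only [avsGo, hrev, ih (pref ++ [c]), List.length_cons]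
    rw [filter_map_range_shift]
    simp only [zero_add, List.take_succ_cons, List.take_zero, List.drop_succ_cons, List.drop_zero]
    by_cases h : pref ++ [c] = (pref ++ [c]).reverse
    · rw [if_pos h, if_pos (by simpa using decide_eq_true h)]
      rw [List.singleton_append, List.append_assoc, List.singleton_append]
      congr 2
      exact congrArg _ (List.filter_congr fun k _ => by simp [List.append_assoc])
    · rw [if_neg h, if_neg (by simpa using decide_eq_false h)]
      rw [List.nil_append]
      congr 1
      exact congrArg _ (List.filter_congr fun k _ => by simp [List.append_assoc])

-- A's loop computes the same positional filter-map form.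
theorem portA_eq (word : String) :
    all_valid_suffixes word =
      ((List.range word.toList.length).filter
          (fun k => decide (word.toList.take (k + 1) = (word.toList.take (k + 1)).reverse))).map
        (fun k => String.ofList (word.toList.drop (k + 1))) := by
  unfold all_valid_suffixes
  rw [PySem.Str.len_eq, PySem.List.pyRange_zero_natCast]
  simp only [PySem.Str.slice?_none_none_neg_one, List.foldl_map]
  rw [PySem.List.foldl_append_ite
        (p := fun k : Nat =>
          PySem.Str.slice word none (some ((k : Int) + 1)) =
            String.ofList (PySem.Str.slice word none (some ((k : Int) + 1))).toList.reverse)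
        (f := fun k : Nat => PySem.Str.slice word (some ((k : Int) + 1)) none)]
  have hcast : ∀ k : Nat, ((k : Int) + 1) = ((k + 1 : Nat) : Int) := by intro k; push_cast; ring
  have hto : ∀ k : Nat, (PySem.Str.slice word none (some ((k : Int) + 1))).toList
      = word.toList.take (k + 1) := by
    intro k
    rw [PySem.Str.toList_slice, PySem.Chars.slice_eq_listSlice, hcast k,
      PySem.List.slice_to_natCast]
  have hdrop : ∀ k : Nat, (PySem.Str.slice word (some ((k : Int) + 1)) none).toList
      = word.toList.drop (k + 1) := by
    intro k
    rw [PySem.Str.toList_slice, PySem.Chars.slice_eq_listSlice, hcast k,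
      PySem.List.slice_from_natCast]
  rw [List.nil_append]
  refine congrArg₂ List.map (funext fun k => ?_) (List.filter_congr fun k _ => ?_)
  · rw [← String.toList_inj, hdrop k]
    simp
  · rw [decide_eq_decide]
    rw [← String.toList_inj, hto k]
    simp

-- ===== VERDICT (by name: the statement is the Claim_ definition above) =====
theorem all_valid_suffixes_spec : Claim_equal_all_valid_suffixes := by
  intro word _
  unfold Spec_all_valid_suffixes all_valid_suffixes_alt
  have hB := avsGo_eq word.toList [] []
  simp only [List.reverse_nil, List.nil_append] at hB
  rw [portA_eq, hB]
  exact congrArg _ (List.filter_congr fun k _ => by rw [decide_eq_decide])
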